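-- pv_equiv track=rewrite | github.com/Yeonseolee/cote-study | yeowonh/PGS64062.py | can_check
-- ===== SOURCE A (Python) =====
-- def can_check(bridge, people, k):
--     # 0 이하 구간이 연속되는 최대 횟수
--     cnt = 0
--
--     for stone in bridge:
--         # 뛰어 넘을 수 없는 칸 : 남은 칸수 - 사람 수 음수면 못뛰어넘는 칸 +1
--         if stone < people:
--             cnt += 1
--             if cnt >= k:
--                 return False
--         else:
--             cnt = 0
--
--     return True
-- ===== SOURCE B (Python) =====
-- def can_check(bridge, people, k):
--     # Indices of stones strong enough to stand on; the maximal weak runs are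
--     # exactly the (positive) gaps between consecutive standing points.
--     strong = [i for i, s in enumerate(bridge) if s >= people]
--     edges = [-1] + strong + [len(bridge)]
--     runs = [b - a - 1 for a, b in zip(edges, edges[1:]) if b - a > 1]
--     return not any(r >= k for r in runs)
-- ===== Notes on version B (the rewrite author's own statement) =====
-- stated objective: alternative
-- what changed: Instead of A's running counter with inline early exit, B collects the indices of stones that can be stood on (stone >= people), brackets them with -1 and len(bridge), reads the maximal weak-run lengths off the positive gaps between consecutive indices, and checks that no run reaches k.
import Mathlib
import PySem

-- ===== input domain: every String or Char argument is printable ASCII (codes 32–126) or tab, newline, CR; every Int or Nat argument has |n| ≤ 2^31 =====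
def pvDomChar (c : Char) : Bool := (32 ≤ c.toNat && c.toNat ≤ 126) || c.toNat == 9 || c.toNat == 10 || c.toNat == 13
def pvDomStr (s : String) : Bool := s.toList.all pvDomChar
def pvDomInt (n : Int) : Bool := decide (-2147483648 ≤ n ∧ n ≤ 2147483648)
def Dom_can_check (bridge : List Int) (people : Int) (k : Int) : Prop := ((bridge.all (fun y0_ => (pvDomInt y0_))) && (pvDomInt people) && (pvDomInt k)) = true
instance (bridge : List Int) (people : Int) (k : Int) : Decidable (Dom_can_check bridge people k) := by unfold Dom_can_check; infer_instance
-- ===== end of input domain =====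

-- B drops A's running counter entirely: it collects the indices of standing-points
-- (stones >= people), reads the maximal weak runs off the gaps between consecutive
-- standing-points, and checks no run reaches k (alternative decomposition, same O(n)).

-- ===== PORT A =====
-- A's for-loop with counter and early return, as structural recursion over the list
def canCheckGo (people : Int) (k : Int) : List Int → Int → Bool
  | [], _ => true
  | stone :: rest, cnt =>
    if stone < people then
      if k ≤ cnt + 1 then false else canCheckGo people k rest (cnt + 1)
    else canCheckGo people k rest 0

def can_check (bridge : List Int) (people : Int) (k : Int) : Bool :=
  canCheckGo people k bridge 0

-- ===== PORT B =====
-- strong = [i for i, s in enumerate(bridge) if s >= people]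
-- edges  = [-1] + strong + [len(bridge)]
-- runs   = [b - a - 1 for a, b in zip(edges, edges[1:]) if b - a > 1]
-- return not any(r >= k for r in runs)
def can_check_alt (bridge : List Int) (people : Int) (k : Int) : Bool :=
  let strong := ((PySem.List.enumerate bridge 0).filter (fun p => decide (people ≤ p.2))).map (fun p => p.1)
  let edges := (-1 : Int) :: (strong ++ [(bridge.length : Int)])
  let runs := ((edges.zip (edges.drop 1)).filter (fun p => decide (p.1 + 1 < p.2))).map (fun p => p.2 - p.1 - 1)
  ! runs.any (fun r => decide (k ≤ r))

-- ===== PRECONDITION & SPEC =====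
def Spec_can_check (bridge : List Int) (people : Int) (k : Int) (out : Bool) : Prop := out = can_check_alt bridge people k
instance (bridge : List Int) (people : Int) (k : Int) (out : Bool) : Decidable (Spec_can_check bridge people k out) := by unfold Spec_can_check; infer_instance

-- ===== CLAIM =====
def Claim_equal_can_check : Prop := ∀ (bridge : List Int) (people : Int) (k : Int), Dom_can_check bridge people k → Spec_can_check bridge people k (can_check bridge people k)

-- ===== LEMMAS AND PROOFS =====

-- strong indices of l, starting at offset i (proof-side view of B's comprehension)
def SF (people : Int) : List Int → Int → List Int
  | [], _ => []
  | x :: t, i => if people ≤ x then i :: SF people t (i + 1) else SF people t (i + 1)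

theorem SF_eq_enum (people : Int) : ∀ (l : List Int) (i : Int),
    ((PySem.List.enumerate l i).filter (fun p => decide (people ≤ p.2))).map (fun p => p.1) = SF people l i := by
  intro l
  induction l with
  | nil => intro i; simp [PySem.List.enumerate_nil, SF]
  | cons x t ih =>
    intro i
    rw [PySem.List.enumerate_cons]
    by_cases h : people ≤ x
    · simp [SF, h, ih]
    · simp [SF, h, ih]

theorem SF_shift (people : Int) : ∀ (l : List Int) (i j : Int),
    SF people l (i + j) = (SF people l i).map (· + j) := by
  intro l
  induction l with
  | nil => intro i j; simp [SF]
  | cons x t ih =>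
    intro i j
    by_cases h : people ≤ x
    · simp only [SF, if_pos h, List.map_cons]
      rw [show i + j + 1 = (i + 1) + j by ring, ih]
    · simp only [SF, if_neg h]
      rw [show i + j + 1 = (i + 1) + j by ring, ih]

theorem SF_weak (people : Int) : ∀ (l : List Int), (∀ x ∈ l, x < people) → ∀ i, SF people l i = [] := by
  intro l
  induction l with
  | nil => intro _ _; rfl
  | cons x t ih =>
    intro h i
    have hx : ¬ people ≤ x := by have := h x (by simp); omega
    simp [SF, hx, ih (fun y hy => h y (by simp [hy]))]

theorem SF_append (people : Int) : ∀ (l r : List Int) (i : Int),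
    SF people (l ++ r) i = SF people l i ++ SF people r (i + l.length) := by
  intro l
  induction l with
  | nil => intro r i; simp [SF]
  | cons x t ih =>
    intro r i
    by_cases h : people ≤ x
    · simp only [List.cons_append, SF, if_pos h, ih, List.length_cons]
      rw [show i + 1 + (t.length : Int) = i + ((t.length : Int) + 1) by ring]
      push_cast
      ring_nf
    · simp only [List.cons_append, SF, if_neg h, ih, List.length_cons]
      rw [show i + 1 + (t.length : Int) = i + ((t.length : Int) + 1) by ring]
      push_cast
      ring_nf

-- the gap test over an edge list
def G (k : Int) (edges : List Int) : Bool :=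
  ! (edges.zip (edges.drop 1)).any (fun p => decide (p.1 + 1 < p.2) && decide (k ≤ p.2 - p.1 - 1))

theorem alt_eq_G (bridge : List Int) (people k : Int) :
    can_check_alt bridge people k = G k ((-1) :: (SF people bridge 0 ++ [(bridge.length : Int)])) := by
  simp only [can_check_alt, SF_eq_enum, G, List.any_map, List.any_filter]
  rfl

theorem G_cons2 (k a b : Int) (es : List Int) :
    G k (a :: b :: es) = ((! (decide (a + 1 < b) && decide (k ≤ b - a - 1))) && G k (b :: es)) := by
  simp [G]

theorem G_single (k a : Int) : G k [a] = true := by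
  simp [G]

theorem G_shift (k c : Int) (edges : List Int) :
    G k (edges.map (· + c)) = G k edges := by
  have hzip : (edges.map (· + c)).zip ((edges.map (· + c)).drop 1)
      = (edges.zip (edges.drop 1)).map (Prod.map (· + c) (· + c)) := by
    rw [← List.map_drop, List.zip_map]
  simp only [G, hzip, List.any_map]
  refine congrArg _ (congrArg _ (funext fun p => ?_))
  obtain ⟨a, b⟩ := p
  simp only [Function.comp, Prod.map]
  congr 1 <;> (rw [decide_eq_decide]; omega)

-- every list splits as an all-weak prefix followed by nothing or a strong-headed suffix
theorem split_weak (people : Int) : ∀ (bridge : List Int),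
    ∃ l r, l ++ r = bridge ∧ (∀ x ∈ l, x < people) ∧ (∀ x r', r = x :: r' → ¬ x < people) := by
  intro bridge
  induction bridge with
  | nil => exact ⟨[], [], rfl, by simp, by intro _ _ h; cases h⟩
  | cons b t ih =>
    by_cases hb : b < people
    · obtain ⟨l, r, hsplit, hlw, hhead⟩ := ih
      exact ⟨b :: l, r, by simp [hsplit], by
        intro x hx
        rcases List.mem_cons.1 hx with h | h
        · subst h; exact hb
        · exact hlw x h, hhead⟩
    · exact ⟨[], b :: t, rfl, by simp, by
        intro x r' h
        cases h
        exact hb⟩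

-- A-side: running the loop through an all-weak prefix
theorem canCheckGo_weak_prefix (people k : Int) : ∀ (l : List Int), (∀ x ∈ l, x < people) →
    ∀ (rest : List Int) (cnt : Int),
    canCheckGo people k (l ++ rest) cnt =
      if 1 ≤ l.length ∧ k ≤ cnt + (l.length : Int) then false
      else canCheckGo people k rest (cnt + (l.length : Int)) := by
  intro l
  induction l with
  | nil =>
    intro _ rest cnt
    simp
  | cons s t ih =>
    intro h rest cnt
    have hs : s < people := h s (by simp)
    have ht : ∀ x ∈ t, x < people := fun x hx => h x (by simp [hx])
    show canCheckGo people k (s :: (t ++ rest)) cnt = _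
    rw [show canCheckGo people k (s :: (t ++ rest)) cnt =
        if k ≤ cnt + 1 then false else canCheckGo people k (t ++ rest) (cnt + 1) by
      simp [canCheckGo, hs]]
    by_cases hk : k ≤ cnt + 1
    · rw [if_pos hk, if_pos ⟨by simp, by simp only [List.length_cons]; push_cast; omega⟩]
    · rw [if_neg hk, ih ht rest (cnt + 1)]
      by_cases h1 : 1 ≤ t.length ∧ k ≤ cnt + 1 + (t.length : Int)
      · rw [if_pos h1, if_pos ⟨by simp, by simp only [List.length_cons]; push_cast; omega⟩]
      · have h2 : ¬ (1 ≤ (s :: t).length ∧ k ≤ cnt + ((s :: t).length : Int)) := by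
          simp only [List.length_cons]
          push_cast
          rcases not_and_or.1 h1 with h3 | h3
          · intro hc
            have ht0 : t.length = 0 := by omega
            rw [ht0] at hc
            push_cast at hc
            omega
          · intro hc
            omega
        rw [if_neg h1, if_neg h2]
        congr 1
        simp only [List.length_cons]
        push_cast
        ring

theorem canCheckGo_reset (people k : Int) (s : Int) (r : List Int) (cnt : Int)
    (h : ¬ s < people) : canCheckGo people k (s :: r) cnt = canCheckGo people k r 0 := by
  simp [canCheckGo, h]

theorem main_equiv (people k : Int) : ∀ (n : Nat) (bridge : List Int), bridge.length ≤ n →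
    can_check bridge people k = can_check_alt bridge people k := by
  intro n
  induction n with
  | zero =>
    intro bridge hb
    have hb0 : bridge = [] := List.length_eq_zero_iff.1 (Nat.le_zero.1 hb)
    subst hb0
    rw [show can_check [] people k = true from rfl, alt_eq_G]
    rw [show ((-1 : Int) :: (SF people [] 0 ++ [((List.length ([] : List Int)) : Int)]))
        = (-1 : Int) :: (0 : Int) :: [] from rfl]
    rw [G_cons2, G_single]
    norm_num
  | succ n ih =>
    intro bridge hb
    obtain ⟨l, r, hsplit, hlw, hhead⟩ := split_weak people bridge
    subst hsplit
    rw [show can_check (l ++ r) people k = canCheckGo people k (l ++ r) 0 from rfl]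
    rw [canCheckGo_weak_prefix people k l hlw r 0, alt_eq_G]
    rw [SF_append, SF_weak people l hlw, List.nil_append]
    cases r with
    | nil =>
      simp only [List.append_nil]
      rw [show SF people [] (0 + (l.length : Int)) = [] from rfl, List.nil_append]
      rw [G_cons2, G_single]
      by_cases hcond : 1 ≤ l.length ∧ k ≤ 0 + (l.length : Int)
      · have h1 : (-1 : Int) + 1 < (l.length : Int) := by have := hcond.1; omega
        have h2 : k ≤ (l.length : Int) - (-1) - 1 := by have := hcond.2; omega
        rw [if_pos hcond, decide_eq_true h1, decide_eq_true h2]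
        rfl
      · rw [if_neg hcond]
        by_cases hg : (-1 : Int) + 1 < (l.length : Int)
        · have h2 : ¬ k ≤ (l.length : Int) - (-1) - 1 := by
            intro hk2
            exact hcond ⟨by omega, by omega⟩
          rw [decide_eq_true hg, decide_eq_false h2]
          rfl
        · rw [decide_eq_false hg]
          rfl
    | cons x r' =>
      have hx : ¬ x < people := hhead x r' rfl
      have hx' : people ≤ x := by omega
      rw [show SF people (x :: r') (0 + (l.length : Int))
          = (0 + (l.length : Int)) :: SF people r' (0 + (l.length : Int) + 1) by
        simp [SF, hx']]
      rw [show SF people r' (0 + (l.length : Int) + 1)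
          = (SF people r' 0).map (· + ((l.length : Int) + 1)) by
        rw [show (0 : Int) + (l.length : Int) + 1 = 0 + ((l.length : Int) + 1) by ring,
          SF_shift]]
      have hedges : ((0 + (l.length : Int)) :: (SF people r' 0).map (· + ((l.length : Int) + 1))
            ++ [(((l ++ x :: r').length : Nat) : Int)])
          = ((-1 : Int) :: (SF people r' 0 ++ [(r'.length : Int)])).map (· + ((l.length : Int) + 1)) := by
        have h1 : (-1 : Int) + ((l.length : Int) + 1) = 0 + (l.length : Int) := by ring
        have h2 : (r'.length : Int) + ((l.length : Int) + 1) = (((l ++ x :: r').length : Nat) : Int) := by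
          simp only [List.length_append, List.length_cons]
          push_cast
          ring
        simp [List.map_cons, List.map_append, h1, h2]
      rw [show ((-1 : Int) :: (((0 + (l.length : Int)) :: (SF people r' 0).map (· + ((l.length : Int) + 1))
            ++ [(((l ++ x :: r').length : Nat) : Int)])))
          = (-1 : Int) :: (((-1 : Int) :: (SF people r' 0 ++ [(r'.length : Int)])).map (· + ((l.length : Int) + 1))) from by
        rw [hedges]]
      rw [show ((-1 : Int) :: (((-1 : Int) :: (SF people r' 0 ++ [(r'.length : Int)])).map (· + ((l.length : Int) + 1))))
          = (-1 : Int) :: ((-1 : Int) + ((l.length : Int) + 1)) :: ((SF people r' 0 ++ [(r'.length : Int)]).map (· + ((l.length : Int) + 1))) from by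
        simp]
      rw [G_cons2]
      rw [show (((-1 : Int) + ((l.length : Int) + 1)) :: ((SF people r' 0 ++ [(r'.length : Int)]).map (· + ((l.length : Int) + 1))))
          = ((-1 : Int) :: (SF people r' 0 ++ [(r'.length : Int)])).map (· + ((l.length : Int) + 1)) from by
        simp]
      rw [G_shift, ← alt_eq_G]
      have hr'len : r'.length ≤ n := by
        have := hb
        simp only [List.length_append, List.length_cons] at this
        omega
      rw [canCheckGo_reset people k x r' (0 + (l.length : Int)) hx]
      rw [show canCheckGo people k r' 0 = can_check r' people k from rfl, ih r' hr'len]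
      by_cases hcond : 1 ≤ l.length ∧ k ≤ 0 + (l.length : Int)
      · have hg : (-1 : Int) + 1 < (-1 : Int) + ((l.length : Int) + 1) := by
          have := hcond.1; omega
        have h2 : k ≤ ((-1 : Int) + ((l.length : Int) + 1)) - (-1) - 1 := by
          have := hcond.2; omega
        rw [if_pos hcond, decide_eq_true hg, decide_eq_true h2]
        rfl
      · rw [if_neg hcond]
        by_cases hg : (-1 : Int) + 1 < (-1 : Int) + ((l.length : Int) + 1)
        · have h2 : ¬ k ≤ ((-1 : Int) + ((l.length : Int) + 1)) - (-1) - 1 := by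
            intro hk2
            exact hcond ⟨by omega, by omega⟩
          rw [decide_eq_true hg, decide_eq_false h2]
          rfl
        · rw [decide_eq_false hg]
          rfl

-- ===== VERDICT =====
theorem can_check_spec : Claim_equal_can_check := by
  intro bridge people k _
  show can_check bridge people k = can_check_alt bridge people k
  exact main_equiv people k bridge.length bridge le_rfl
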